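-- pv_equiv track=rewrite | github.com/delimitry/networks | networks/snmp.py | encode_to_7bit
-- ===== SOURCE A (Python) =====
-- def encode_to_7bit(value):
--     """Encode to 7 bit"""
--     if value > 0x7f:
--         res = []
--         res.insert(0, value & 0x7f)
--         while value > 0x7f:
--             value >>= 7
--             res.insert(0, (value & 0x7f) | 0x80)
--         return res
--     return [value]
-- ===== SOURCE B (Python) =====
-- def encode_to_7bit(value):
--     """Encode to 7 bit"""
--     if value <= 0x7f:
--         return [value]
--     # first pass: find shift of the most-significant 7-bit group
--     shift = 0
--     while (value >> shift) > 0x7f: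
--         shift += 7
--     # second pass: emit MSB-first
--     res = []
--     while shift > 0:
--         res.append(((value >> shift) & 0x7f) | 0x80)
--         shift -= 7
--     res.append(value & 0x7f)
--     return res
-- ===== Notes on version B (the rewrite author's own statement) =====
-- stated objective: alternative
-- what changed: A builds the byte list LSB-first with insert(0, ...) while shifting the value in place; B first scans for the shift of the most-significant 7-bit group, then emits the bytes MSB-first in a second loop using only >> and &.
import Mathlib
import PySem

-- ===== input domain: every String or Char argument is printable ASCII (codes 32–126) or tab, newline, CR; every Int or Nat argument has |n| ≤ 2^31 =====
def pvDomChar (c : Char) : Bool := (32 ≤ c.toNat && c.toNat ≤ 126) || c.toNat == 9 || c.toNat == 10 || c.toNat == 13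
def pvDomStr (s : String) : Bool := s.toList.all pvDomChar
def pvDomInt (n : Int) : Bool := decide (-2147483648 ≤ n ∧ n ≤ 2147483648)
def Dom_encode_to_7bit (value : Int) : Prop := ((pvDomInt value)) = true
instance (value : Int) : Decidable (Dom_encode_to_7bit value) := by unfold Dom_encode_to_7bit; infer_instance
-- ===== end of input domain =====

-- B re-implements the same encoding with a different decomposition: instead of A's
-- LSB-first loop with insert(0, …), B first locates the most-significant 7-bit group
-- and then emits the bytes MSB-first in a second loop (objective: alternative, no speed claim).

-- ===== PORT A =====
-- the 'while value > 0x7f' loop of A: state = (value, res), res built by insert(0, …)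
def pvALoop (v : Int) (res : List Int) : List Int :=
  if v > 0x7f then
    pvALoop (v >>> (7:Nat)) ((PySem.Int.bor (PySem.Int.band (v >>> (7:Nat)) 0x7f) 0x80) :: res)
  else res
termination_by v.toNat
decreasing_by
  simp only [Int.shiftRight_eq_div_pow]
  omega

def encode_to_7bit (value : Int) : List Int :=
  if value > 0x7f then
    pvALoop value [PySem.Int.band value 0x7f]
  else [value]

-- ===== PORT B =====
-- B's first pass: grow shift by 7 until (value >> shift) fits in 7 bits
def pvShiftUp (value : Int) (shift : Nat) : Nat :=
  if (value >>> shift) > 0x7f then pvShiftUp value (shift + 7) else shift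
termination_by (value >>> shift).toNat
decreasing_by
  rw [show shift + 7 = shift + (7:Nat) from rfl, Int.shiftRight_add]
  generalize value >>> shift = w at *
  simp only [Int.shiftRight_eq_div_pow] at *
  omega

-- B's second pass: emit MSB-first, continuation bit on every byte except the last
def pvEmit (value : Int) (shift : Nat) (res : List Int) : List Int :=
  if shift > 0 then
    pvEmit value (shift - 7) (res ++ [PySem.Int.bor (PySem.Int.band (value >>> shift) 0x7f) 0x80])
  else res ++ [PySem.Int.band value 0x7f]
termination_by shift
decreasing_by omega

def encode_to_7bit_alt (value : Int) : List Int :=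
  if value ≤ 0x7f then [value]
  else pvEmit value (pvShiftUp value 0) []

-- ===== PRECONDITION & SPEC =====
def Spec_encode_to_7bit (value : Int) (out : List Int) : Prop := out = encode_to_7bit_alt value
instance (value : Int) (out : List Int) : Decidable (Spec_encode_to_7bit value out) := by unfold Spec_encode_to_7bit; infer_instance

-- ===== CLAIM (what is proved, stated in full; the proofs are below) =====
def Claim_equal_encode_to_7bit : Prop := ∀ (value : Int), Dom_encode_to_7bit value → Spec_encode_to_7bit value (encode_to_7bit value)

-- ===== LEMMAS AND PROOFS =====

-- number of continuation bytes (= loop iterations of A)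
def pvN (v : Int) : Nat :=
  if v > 0x7f then pvN (v >>> (7:Nat)) + 1 else 0
termination_by v.toNat
decreasing_by
  simp only [Int.shiftRight_eq_div_pow]
  omega

-- the k continuation bytes of v, MSB-first
def pvRefC (v : Int) : Nat → List Int
  | 0 => []
  | k + 1 => (PySem.Int.bor (PySem.Int.band (v >>> (7 * (k + 1))) 0x7f) 0x80) :: pvRefC v k

theorem pvRefC_shift (k : Nat) (v : Int) :
    pvRefC (v >>> (7:Nat)) k ++ [PySem.Int.bor (PySem.Int.band (v >>> (7:Nat)) 0x7f) 0x80] = pvRefC v (k + 1) := by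
  induction k with
  | zero => simp [pvRefC]
  | succ k ih =>
    have h7 : (7:Nat) + 7 * (k + 1) = 7 * (k + 1 + 1) := by ring
    simp only [pvRefC, List.cons_append, ih, ← Int.shiftRight_add, h7]

theorem pvALoop_eq (v : Int) (res : List Int) :
    pvALoop v res = pvRefC v (pvN v) ++ res := by
  induction v, res using pvALoop.induct with
  | case1 v res h ih =>
    rw [pvALoop, if_pos h, ih,
      show pvN v = pvN (v >>> (7:Nat)) + 1 by rw [pvN]; rw [if_pos h],
      ← pvRefC_shift]
    simp
  | case2 v res h =>
    rw [pvALoop, if_neg h, pvN, if_neg h]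
    simp [pvRefC]

theorem pvShiftUp_eq (v : Int) (sh : Nat) :
    pvShiftUp v sh = sh + 7 * pvN (v >>> sh) := by
  induction sh using pvShiftUp.induct (value := v) with
  | case1 sh h ih =>
    rw [pvShiftUp, if_pos h, ih,
      show pvN (v >>> sh) = pvN ((v >>> sh) >>> (7:Nat)) + 1 by rw [pvN]; rw [if_pos h],
      ← Int.shiftRight_add]
    omega
  | case2 sh h =>
    rw [pvShiftUp, if_neg h, pvN, if_neg h]
    omega

theorem pvEmit_eq (k : Nat) (v : Int) (res : List Int) :
    pvEmit v (7 * k) res = res ++ pvRefC v k ++ [PySem.Int.band v 0x7f] := by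
  induction k generalizing res with
  | zero => rw [pvEmit]; simp [pvRefC]
  | succ k ih =>
    have hpos : 7 * (k + 1) > 0 := by omega
    have hsub : 7 * (k + 1) - 7 = 7 * k := by omega
    rw [pvEmit, if_pos hpos, hsub, ih]
    simp [pvRefC]

-- ===== VERDICT (by name: the statement is the Claim_ definition above) =====
theorem encode_to_7bit_spec : Claim_equal_encode_to_7bit := by
  intro value _
  unfold Spec_encode_to_7bit encode_to_7bit encode_to_7bit_alt
  by_cases h : value > 0x7f
  · rw [if_pos h, if_neg (by omega), pvALoop_eq, pvShiftUp_eq]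
    have h0 : value >>> (0:Nat) = value := by
      simp [Int.shiftRight_eq_div_pow]
    rw [h0, Nat.zero_add, pvEmit_eq]
    simp
  · rw [if_neg h, if_pos (by omega)]
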